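-- pv_equiv track=rewrite | github.com/rvarshini5656/Gene_Folding | gene_folding.py | checkfold
-- ===== SOURCE A (Python) =====
-- def checkfold(sequence):
--     mid = len(sequence) // 2
--     while mid > 0:
--         if sequence[:mid][::-1] == sequence[mid: 2 * mid]:
--             sequence = sequence[mid:]
--             mid = len(sequence) // 2
--         else:
--             mid -= 1
--     return sequence[::-1]
-- ===== SOURCE B (Python) =====
-- def _zfunc(t):
--     # Z-array: z[i] = length of the longest common prefix of t and t[i:] (i >= 1).
--     n = len(t)
--     z = [0] * n
--     l = r = 0
--     for i in range(1, n):
--         if i < r: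
--             z[i] = min(r - i, z[i - l])
--         while i + z[i] < n and t[z[i]] == t[i + z[i]]:
--             z[i] += 1
--         if i + z[i] > r:
--             l, r = i, i + z[i]
--     return z
--
--
-- def checkfold(sequence):
--     # Per round, one Z-array of sequence + sep + reversed(sequence) answers
--     # "is the prefix of length 2m an even palindrome?" in O(1) per m, so each
--     # fold step costs O(n) instead of A's O(n^2) of slice comparisons.
--     while True:
--         n = len(sequence)
--         t = sequence + "\x00" + sequence[::-1]
--         z = _zfunc(t)
--         m = max((k for k in range(1, n // 2 + 1) if z[2 * n + 1 - 2 * k] == 2 * k),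
--                 default=0)
--         if m == 0:
--             return sequence[::-1]
--         sequence = sequence[m:]
-- ===== Notes on version B (the rewrite author's own statement) =====
-- stated objective: faster
-- what changed: B computes one Z-array of sequence + sentinel + reversed(sequence) per fold round, so each candidate even-palindromic prefix is tested in O(1) (picking the largest by a max over candidates), instead of A's materialising, reversing and comparing two slices for every candidate; a fold round costs O(n) instead of O(n^2).
import Mathlib
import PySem

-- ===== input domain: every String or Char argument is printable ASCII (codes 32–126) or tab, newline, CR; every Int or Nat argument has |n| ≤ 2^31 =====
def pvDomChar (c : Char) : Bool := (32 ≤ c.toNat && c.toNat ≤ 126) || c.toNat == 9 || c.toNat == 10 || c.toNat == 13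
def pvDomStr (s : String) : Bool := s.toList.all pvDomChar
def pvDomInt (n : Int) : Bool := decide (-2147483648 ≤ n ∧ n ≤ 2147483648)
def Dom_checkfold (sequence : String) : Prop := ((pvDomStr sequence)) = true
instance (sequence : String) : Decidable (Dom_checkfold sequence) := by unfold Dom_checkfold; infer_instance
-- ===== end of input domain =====

-- B finds each fold point with a Z-array (one linear prefix-match pass per round)
-- instead of A's per-candidate slice comparisons; return value only, no mutation.

-- ===== PORT A =====
-- while loop of A: state = (sequence, mid); sequence[:mid][::-1] == sequence[mid: 2*mid].
-- fuel only makes the loop structurally recursive; it starts above the loop's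
-- decreasing measure len*len + mid, so the 0-case is never reached.
def checkfoldLoopA (fuel : Nat) (s : List Char) (mid : Nat) : List Char :=
  match fuel with
  | 0 => s
  | fuel + 1 =>
    if 0 < mid then
      if (PySem.List.slice s none (some (mid : Int))).reverse ==
          PySem.List.slice s (some (mid : Int)) (some (2 * (mid : Int))) then
        -- sequence = sequence[mid:]; mid = len(sequence) // 2 (len ≥ 0, so // = Nat division)
        checkfoldLoopA fuel (PySem.List.slice s (some (mid : Int)) none)
          ((PySem.List.slice s (some (mid : Int)) none).length / 2)
      else
        checkfoldLoopA fuel s (mid - 1)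
    else s

def checkfold (sequence : String) : String :=
  String.mk ((checkfoldLoopA
      (sequence.toList.length * sequence.toList.length + sequence.toList.length + 1)
      sequence.toList (sequence.toList.length / 2)).reverse)

-- ===== PORT B =====
-- inner while of _zfunc: z[i] += 1 while the next characters match; all ints in
-- _zfunc are nonnegative and every index Python reads is in range, so Nat state
-- and getD are exact.
def pvZwhile (t : List Char) (i k : Nat) : Nat :=
  if h : i + k < t.length ∧ t.getD k ' ' = t.getD (i + k) ' ' then pvZwhile t i (k + 1) else k
termination_by t.length - (i + k)
decreasing_by omega

-- body of _zfunc's for-loop: state = (z, l, r); in the 'else' branch Python leaves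
-- z[i] at its current value (still its initial 0), written here as z.getD i 0
def pvZstep (t : List Char) (st : Array Nat × Nat × Nat) (i : Nat) : Array Nat × Nat × Nat :=
  let k0 := if i < st.2.2 then min (st.2.2 - i) (st.1.getD (i - st.2.1) 0) else st.1.getD i 0
  let k := pvZwhile t i k0
  let z' := st.1.set! i k
  if st.2.2 < i + k then (z', i, i + k) else (z', st.2.1, st.2.2)

-- _zfunc: z = [0]*n; for i in range(1, n): …
def pvZfunc (t : List Char) : Array Nat :=
  ((List.range' 1 (t.length - 1)).foldl (pvZstep t) (Array.replicate t.length 0, 0, 0)).1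

-- outer while True of B; fuel len+1 exceeds the iteration count (m ≥ 1 on each fold).
-- max(generator, default=0) = foldl max 0, exact since every candidate is ≥ 1.
def pvBloop (fuel : Nat) (u : List Char) : List Char :=
  match fuel with
  | 0 => u.reverse
  | fuel + 1 =>
    let n := u.length
    let t := u ++ '\x00' :: u.reverse                 -- sequence + "\x00" + sequence[::-1]
    let z := pvZfunc t
    let m := ((List.range' 1 (n / 2)).filter          -- range(1, n//2 + 1)
        (fun k => z.getD (2 * n + 1 - 2 * k) 0 == 2 * k)).foldl max 0
    if m = 0 then u.reverse else pvBloop fuel (u.drop m)   -- sequence[m:]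

def checkfold_alt (sequence : String) : String :=
  String.mk (pvBloop (sequence.toList.length + 1) sequence.toList)

-- ===== PRECONDITION & SPEC =====
def Spec_checkfold (sequence : String) (out : String) : Prop := out = checkfold_alt sequence
instance (sequence : String) (out : String) : Decidable (Spec_checkfold sequence out) := by unfold Spec_checkfold; infer_instance

-- ===== CLAIM (what is proved, stated in full; the proofs are below) =====
def Claim_equal_checkfold : Prop := ∀ (sequence : String), Dom_checkfold sequence → Spec_checkfold sequence (checkfold sequence)

-- ===== LEMMAS AND PROOFS =====

-- naive longest-common-prefix, the specification of the Z-array entries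
def pvLcp : List Char → List Char → Nat
  | a :: as, b :: bs => if a = b then pvLcp as bs + 1 else 0
  | _, _ => 0

theorem pvLcp_le (a b : List Char) : pvLcp a b ≤ min a.length b.length := by
  
  induction a generalizing b with
  | nil => cases b <;> simp [pvLcp]
  | cons x as ih =>
    cases b with
    | nil => simp [pvLcp]
    | cons y bs =>
      simp only [pvLcp, List.length_cons]
      split_ifs with hxy
      · have := ih bs; omega
      · omega

theorem pvLcp_match (a b : List Char) (j : Nat) (h : j < pvLcp a b) :
    a.getD j ' ' = b.getD j ' ' := by
  
  induction a generalizing b j with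
  | nil => simp [pvLcp] at h
  | cons x as ih =>
    cases b with
    | nil => simp [pvLcp] at h
    | cons y bs =>
      simp only [pvLcp] at h
      split_ifs at h with hxy
      · cases j with
        | zero => simpa [List.getD_cons_zero] using hxy
        | succ j => simpa [List.getD_cons_succ] using ih bs j (by omega)
      · omega

theorem pvLcp_mismatch (a b : List Char) (h1 : pvLcp a b < a.length) (h2 : pvLcp a b < b.length) :
    a.getD (pvLcp a b) ' ' ≠ b.getD (pvLcp a b) ' ' := by
  
  induction a generalizing b with
  | nil => simp at h1
  | cons x as ih =>
    cases b with
    | nil => simp at h2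
    | cons y bs =>
      by_cases hxy : x = y
      · simp only [pvLcp, if_pos hxy] at h1 h2 ⊢
        simp only [List.length_cons] at h1 h2
        simpa [List.getD_cons_succ] using ih bs (by omega) (by omega)
      · simp only [pvLcp, if_neg hxy]
        simpa [List.getD_cons_zero] using hxy

theorem pvLcp_ge (a b : List Char) (k : Nat) (h1 : k ≤ a.length) (h2 : k ≤ b.length)
    (h : ∀ j, j < k → a.getD j ' ' = b.getD j ' ') : k ≤ pvLcp a b := by
  
  induction a generalizing b k with
  | nil => simp at h1; omega
  | cons x as ih =>
    cases b with
    | nil => simp at h2; omega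
    | cons y bs =>
      cases k with
      | zero => exact Nat.zero_le _
      | succ k =>
        have hxy : x = y := by simpa [List.getD_cons_zero] using h 0 (by omega)
        simp only [pvLcp, if_pos hxy]
        have hk : k ≤ pvLcp as bs := by
          apply ih bs k (by simpa using h1) (by simpa using h2)
          intro j hj
          simpa [List.getD_cons_succ] using h (j + 1) (by omega)
        omega

theorem pvGetD_drop (s : List Char) (i j : Nat) :
    (s.drop i).getD j ' ' = s.getD (i + j) ' ' := by
  simp [List.getD_eq_getElem?_getD, List.getElem?_drop]


theorem pvGetD_eq_getElem (l : List Char) (j : Nat) (h : j < l.length) : l.getD j ' ' = l[j] := by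
  simp [List.getD_eq_getElem?_getD, List.getElem?_eq_getElem h]

theorem pvAGetD_set (z : Array Nat) (i p v : Nat) (hi : i < z.size) :
    (z.set! i v).getD p 0 = if p = i then v else z.getD p 0 := by
  rw [Array.set!_eq_setIfInBounds, Array.getD_eq_getD_getElem?, Array.getD_eq_getD_getElem?,
    Array.getElem?_setIfInBounds]
  by_cases h : i = p
  · subst h; simp [hi]
  · rw [if_neg h, if_neg (fun hh => h hh.symm)]

-- the while loop computes the exact lcp from any sound starting point
theorem pvZwhile_eq (t : List Char) (i k : Nat) (hk : k ≤ pvLcp t (t.drop i)) :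
    pvZwhile t i k = pvLcp t (t.drop i) := by
  
  have hL := pvLcp_le t (t.drop i)
  rw [List.length_drop] at hL
  have main : ∀ d k, t.length - (i + k) ≤ d → k ≤ pvLcp t (t.drop i) →
      pvZwhile t i k = pvLcp t (t.drop i) := by
    intro d
    induction d with
    | zero =>
      intro k hd hk
      rw [pvZwhile, dif_neg (fun hg => absurd hg.1 (by omega))]
      omega
    | succ d ih =>
      intro k hd hk
      by_cases hg : i + k < t.length ∧ t.getD k ' ' = t.getD (i + k) ' '
      · rw [pvZwhile, dif_pos hg]
        apply ih _ (by omega)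
        rcases Nat.lt_or_ge k (pvLcp t (t.drop i)) with hlt | hge
        · omega
        · exfalso
          have hkL : k = pvLcp t (t.drop i) := by omega
          have hm := pvLcp_mismatch t (t.drop i) (by omega) (by rw [List.length_drop]; omega)
          rw [← hkL] at hm
          exact hm (by rw [pvGetD_drop]; exact hg.2)
      · rw [pvZwhile, dif_neg hg]
        rcases Nat.lt_or_ge k (pvLcp t (t.drop i)) with hlt | hge
        · exfalso
          apply hg
          refine ⟨by omega, ?_⟩
          have := pvLcp_match t (t.drop i) k hlt
          rwa [pvGetD_drop] at this
        · omega
  exact main (t.length - (i + k)) k le_rfl hk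

-- invariant of _zfunc's for-loop after processing i = 1 .. j
def pvZInv (t : List Char) (j : Nat) (st : Array Nat × Nat × Nat) : Prop :=
  st.1.size = t.length ∧
  (∀ p, 1 ≤ p → p ≤ j → st.1.getD p 0 = pvLcp t (t.drop p)) ∧
  (∀ p, j < p → st.1.getD p 0 = 0) ∧
  ((st.2.1 = 0 ∧ st.2.2 = 0) ∨
    (1 ≤ st.2.1 ∧ st.2.1 ≤ j ∧ st.2.2 = st.2.1 + pvLcp t (t.drop st.2.1)))

theorem pvZInv_intro (t : List Char) (j : Nat) (z : Array Nat) (l r : Nat)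
    (h1 : z.size = t.length)
    (h2 : ∀ p, 1 ≤ p → p ≤ j → z.getD p 0 = pvLcp t (t.drop p))
    (h3 : ∀ p, j < p → z.getD p 0 = 0)
    (h4 : (l = 0 ∧ r = 0) ∨ (1 ≤ l ∧ l ≤ j ∧ r = l + pvLcp t (t.drop l))) :
    pvZInv t j (z, l, r) := ⟨h1, h2, h3, h4⟩

theorem pvZInv_elim (t : List Char) (j : Nat) (z : Array Nat) (l r : Nat)
    (h : pvZInv t j (z, l, r)) :
    z.size = t.length ∧
    (∀ p, 1 ≤ p → p ≤ j → z.getD p 0 = pvLcp t (t.drop p)) ∧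
    (∀ p, j < p → z.getD p 0 = 0) ∧
    ((l = 0 ∧ r = 0) ∨ (1 ≤ l ∧ l ≤ j ∧ r = l + pvLcp t (t.drop l))) := h

theorem pvZstep_inv (t : List Char) (j : Nat) (st : Array Nat × Nat × Nat)
    (hinv : pvZInv t j st) (hj : j + 1 < t.length) :
    pvZInv t (j + 1) (pvZstep t st (j + 1)) := by
  
  obtain ⟨z, l, r⟩ := st
  obtain ⟨hsz, hdone, hzero, hbox⟩ := pvZInv_elim t j z l r hinv
  have hk0 : (if j + 1 < r then min (r - (j + 1)) (z.getD (j + 1 - l) 0) else z.getD (j + 1) 0)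
      ≤ pvLcp t (t.drop (j + 1)) := by
    by_cases hir : j + 1 < r
    · rw [if_pos hir]
      rcases hbox with ⟨hl0, hr0⟩ | ⟨hl1, hlj, hr⟩
      · omega
      · have hd1 : 1 ≤ j + 1 - l := by omega
        have hdj : j + 1 - l ≤ j := by omega
        have hzd := hdone (j + 1 - l) hd1 hdj
        rw [hzd]
        have hLl := pvLcp_le t (t.drop l)
        rw [List.length_drop] at hLl
        have hLd := pvLcp_le t (t.drop (j + 1 - l))
        rw [List.length_drop] at hLd
        apply pvLcp_ge
        · omega
        · rw [List.length_drop]; omega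
        · intro j' hj'
          rw [pvGetD_drop]
          have e1 : t.getD j' ' ' = t.getD ((j + 1 - l) + j') ' ' := by
            have := pvLcp_match t (t.drop (j + 1 - l)) j' (by omega)
            rwa [pvGetD_drop] at this
          have e2 : t.getD ((j + 1 - l) + j') ' ' = t.getD (l + ((j + 1 - l) + j')) ' ' := by
            have := pvLcp_match t (t.drop l) ((j + 1 - l) + j') (by omega)
            rwa [pvGetD_drop] at this
          rw [e1, e2, show l + ((j + 1 - l) + j') = (j + 1) + j' from by omega]
    · rw [if_neg hir, hzero (j + 1) (by omega)]
      exact Nat.zero_le _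
  have hk : pvZwhile t (j + 1)
      (if j + 1 < r then min (r - (j + 1)) (z.getD (j + 1 - l) 0) else z.getD (j + 1) 0)
      = pvLcp t (t.drop (j + 1)) := pvZwhile_eq t (j + 1) _ hk0
  have hstep : pvZstep t (z, l, r) (j + 1) =
      (if r < (j + 1) + pvLcp t (t.drop (j + 1))
       then (z.set! (j + 1) (pvLcp t (t.drop (j + 1))), j + 1, (j + 1) + pvLcp t (t.drop (j + 1)))
       else (z.set! (j + 1) (pvLcp t (t.drop (j + 1))), l, r)) := by
    simp only [pvZstep]
    rw [hk]
  have hiz : j + 1 < z.size := by omega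
  have hget : ∀ p v, (z.set! (j + 1) v).getD p 0 = if p = j + 1 then v else z.getD p 0 :=
    fun p v => pvAGetD_set z (j + 1) p v hiz
  have hsz' : ∀ v : Nat, (z.set! (j + 1) v).size = z.size := by
    intro v; rw [Array.set!_eq_setIfInBounds, Array.size_setIfInBounds]
  have hdone' : ∀ p, 1 ≤ p → p ≤ j + 1 →
      (z.set! (j + 1) (pvLcp t (t.drop (j + 1)))).getD p 0 = pvLcp t (t.drop p) := by
    intro p h1 h2
    rw [hget]
    by_cases hp : p = j + 1
    · rw [if_pos hp, hp]
    · rw [if_neg hp]; exact hdone p h1 (by omega)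
  have hzero' : ∀ p, j + 1 < p →
      (z.set! (j + 1) (pvLcp t (t.drop (j + 1)))).getD p 0 = 0 := by
    intro p hp
    rw [hget, if_neg (by omega)]
    exact hzero p (by omega)
  rw [hstep]
  split_ifs with hcase
  · exact pvZInv_intro t (j + 1) _ _ _ (by rw [hsz']; exact hsz) hdone' hzero'
      (Or.inr ⟨by omega, le_rfl, rfl⟩)
  · refine pvZInv_intro t (j + 1) _ _ _ (by rw [hsz']; exact hsz) hdone' hzero' ?_
    rcases hbox with ⟨hl0, hr0⟩ | ⟨hl1, hlj, hr⟩
    · exact Or.inl ⟨hl0, hr0⟩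
    · exact Or.inr ⟨hl1, by omega, hr⟩


theorem pvZfold_inv (t : List Char) (j : Nat) (hj : j ≤ t.length - 1) :
    pvZInv t j ((List.range' 1 j).foldl (pvZstep t) (Array.replicate t.length 0, 0, 0)) := by
  induction j with
  | zero =>
    show pvZInv t 0 (Array.replicate t.length 0, 0, 0)
    refine pvZInv_intro _ _ _ _ _ (by simp) (fun p h1 h2 => by omega) (fun p hp => ?_)
      (Or.inl ⟨rfl, rfl⟩)
    rw [Array.getD_eq_getD_getElem?, Array.getElem?_replicate]
    split <;> rfl
  | succ j ih =>
    rw [List.range'_1_concat, List.foldl_append]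
    simp only [List.foldl_cons, List.foldl_nil]
    rw [show 1 + j = j + 1 from by omega]
    exact pvZstep_inv t j _ (ih (by omega)) (by omega)

theorem pvZfunc_eq (t : List Char) (p : Nat) (h1 : 1 ≤ p) (h2 : p < t.length) :
    (pvZfunc t).getD p 0 = pvLcp t (t.drop p) := by
  
  unfold pvZfunc
  exact (pvZfold_inv t (t.length - 1) le_rfl).2.1 p h1 (by omega)

-- lcp a b = |b| exactly when b is a prefix of a
theorem pvLcp_eq_len (a b : List Char) (h : b.length ≤ a.length) :
    pvLcp a b = b.length ↔ a.take b.length = b := by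
  
  constructor
  · intro hL
    apply List.ext_getElem (by simp; omega)
    intro j hj1 hj2
    have hja : j < a.length := by omega
    have hm := pvLcp_match a b j (by omega)
    rw [pvGetD_eq_getElem a j hja, pvGetD_eq_getElem b j hj2] at hm
    simpa [List.getElem_take] using hm
  · intro ht
    have hge : b.length ≤ pvLcp a b := by
      apply pvLcp_ge a b b.length h le_rfl
      intro j hj
      have hq : (a.take b.length)[j]? = b[j]? := by rw [ht]
      rw [List.getElem?_take, if_pos hj] at hq
      rw [List.getD_eq_getElem?_getD, List.getD_eq_getElem?_getD, hq]
    have hle := pvLcp_le a b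
    omega

-- the Z-array test = "the prefix of length 2k is an even palindrome"
theorem pvZcond_iff (u : List Char) (k : Nat) (h1 : 1 ≤ k) (h2 : k ≤ u.length / 2) :
    ((pvZfunc (u ++ '\x00' :: u.reverse)).getD (2 * u.length + 1 - 2 * k) 0 = 2 * k)
      ↔ u.take (2 * k) = (u.take (2 * k)).reverse := by
  
  have h2k : 2 * k ≤ u.length := by omega
  have hlt : (u ++ '\x00' :: u.reverse).length = 2 * u.length + 1 := by
    simp [List.length_append, List.length_cons, List.length_reverse]; omega
  rw [pvZfunc_eq _ _ (by omega) (by omega)]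
  have hdrop : (u ++ '\x00' :: u.reverse).drop (2 * u.length + 1 - 2 * k)
      = u.reverse.drop (u.length - 2 * k) := by
    rw [show 2 * u.length + 1 - 2 * k = u.length + (1 + (u.length - 2 * k)) from by omega]
    rw [show (u.length : Nat) = (u : List Char).length from rfl]
    rw [List.drop_length_add_append]
    rw [show 1 + (u.length - 2 * k) = (u.length - 2 * k) + 1 from by omega]
    rw [List.drop_succ_cons]
  rw [hdrop]
  have hlen : (u.reverse.drop (u.length - 2 * k)).length = 2 * k := by simp; omega
  have hiff := pvLcp_eq_len (u ++ '\x00' :: u.reverse) (u.reverse.drop (u.length - 2 * k))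
    (by rw [hlen, hlt]; omega)
  rw [hlen] at hiff
  rw [hiff]
  rw [List.take_append_of_le_length h2k]
  rw [show u.reverse.drop (u.length - 2 * k) = (u.take (2 * k)).reverse from
    (List.reverse_take).symm]

-- A's slice test = the same palindrome condition
theorem pvChkA_iff (u : List Char) (m : Nat) (h : 2 * m ≤ u.length) :
    ((u.take m).reverse = (u.drop m).take m) ↔ u.take (2 * m) = (u.take (2 * m)).reverse := by
  
  have h2 : u.take (2 * m) = u.take m ++ (u.drop m).take m := by
    rw [show 2 * m = m + m from by omega, List.take_add]
  have hx : (u.take m).length = m := by simp; omega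
  have hy : ((u.drop m).take m).length = m := by simp; omega
  rw [h2]
  constructor
  · intro hxy
    have hyx : ((u.drop m).take m).reverse = u.take m := by
      rw [← hxy, List.reverse_reverse]
    rw [List.reverse_append, hyx, hxy]
  · intro hpal
    rw [List.reverse_append] at hpal
    have hinj := List.append_inj hpal (by rw [hx, List.length_reverse, hy])
    rw [hinj.1, List.reverse_reverse]

-- A's test as a Bool
def pvChk (u : List Char) (m : Nat) : Bool := (u.take m).reverse == (u.drop m).take m

-- downward first-hit scan (what A's interleaved mid-decrements amount to)
def pvFindDown (Q : Nat → Bool) : Nat → Nat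
  | 0 => 0
  | m + 1 => if Q (m + 1) then m + 1 else pvFindDown Q m

theorem pvFindDown_congr (Q Q' : Nat → Bool) (m : Nat)
    (h : ∀ k, 1 ≤ k → k ≤ m → Q k = Q' k) : pvFindDown Q m = pvFindDown Q' m := by
  
  induction m with
  | zero => rfl
  | succ m ih =>
    simp only [pvFindDown]
    rw [h (m + 1) (by omega) le_rfl]
    split_ifs with hq
    · rfl
    · exact ih (fun k hk1 hk2 => h k hk1 (by omega))

theorem pvFindDown_cases (Q : Nat → Bool) (m : Nat) :
    pvFindDown Q m = 0 ∨ (1 ≤ pvFindDown Q m ∧ pvFindDown Q m ≤ m ∧ Q (pvFindDown Q m) = true) := by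
  
  induction m with
  | zero => left; rfl
  | succ m ih =>
    simp only [pvFindDown]
    split_ifs with hq
    · right; exact ⟨by omega, le_rfl, hq⟩
    · rcases ih with h0 | ⟨ha, hb, hc⟩
      · left; exact h0
      · right; exact ⟨ha, by omega, hc⟩


theorem pvFoldlMax_le (xs : List Nat) : ∀ (a c : Nat), (∀ x ∈ xs, x ≤ c) → a ≤ c →
    xs.foldl max a ≤ c := by
  induction xs with
  | nil => intro a c hx ha; simpa using ha
  | cons x xs ih =>
    intro a c hx ha
    simp only [List.foldl_cons]
    exact ih _ _ (fun y hy => hx y (List.mem_cons_of_mem _ hy))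
      (Nat.max_le.mpr ⟨ha, hx x (List.mem_cons_self ..)⟩)

-- B's max-of-filter equals the downward first hit
theorem pvMaxFilter_eq (Q : Nat → Bool) (m : Nat) :
    ((List.range' 1 m).filter Q).foldl max 0 = pvFindDown Q m := by
  
  induction m with
  | zero => rfl
  | succ m ih =>
    rw [List.range'_1_concat, show 1 + m = m + 1 from by omega, List.filter_append,
      List.foldl_append]
    simp only [List.filter_cons, List.filter_nil]
    by_cases hq : Q (m + 1) = true
    · simp only [hq, if_true, List.foldl_cons, List.foldl_nil]
      have hb : ((List.range' 1 m).filter Q).foldl max 0 ≤ m + 1 := by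
        apply pvFoldlMax_le
        · intro x hx
          have := List.mem_range'_1.mp (List.mem_filter.mp hx).1
          omega
        · omega
      simp only [pvFindDown, hq, if_true]
      exact Nat.max_eq_right hb
    · simp only [hq]
      simp only [pvFindDown, hq]
      exact ih

-- termination measure lemma for the folding step
theorem pvMeas_fold (len mid : Nat) (hmid : 0 < mid) :
    (len - mid) * (len - mid) + (len - mid) / 2 < len * len + mid := by
  rcases Nat.eq_zero_or_pos len with h0 | h0
  · simp [h0]; omega
  · have h1 : len - mid ≤ len - 1 := by omega
    have h2 : (len - mid) / 2 ≤ len - mid := Nat.div_le_self _ _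
    have h3 : (len - mid) * (len - mid) ≤ (len - 1) * (len - 1) := Nat.mul_le_mul h1 h1
    have h4 : (len - 1) * (len - 1) + (len - 1) = (len - 1) * len := by
      cases len with
      | zero => omega
      | succ k => simp [Nat.mul_succ]
    have h5 : (len - 1) * len < len * len :=
      Nat.mul_lt_mul_of_lt_of_le (by omega) le_rfl (by omega)
    omega

-- A's loop as a well-founded recursion (proof-side device)
def pvGA (u : List Char) (mid : Nat) : List Char :=
  if 0 < mid then
    if pvChk u mid then pvGA (u.drop mid) ((u.length - mid) / 2) else pvGA u (mid - 1)
  else u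
termination_by u.length * u.length + mid
decreasing_by
  · have h := pvMeas_fold u.length mid (by omega)
    simpa using h
  · omega

theorem pvLoopA_eq_gA (fuel : Nat) : ∀ (u : List Char) (mid : Nat),
    u.length * u.length + mid < fuel → checkfoldLoopA fuel u mid = pvGA u mid := by
  
  induction fuel with
  | zero => intro u mid h; omega
  | succ fuel ih =>
    intro u mid h
    rw [pvGA]
    simp only [checkfoldLoopA]
    by_cases hmid : 0 < mid
    · rw [if_pos hmid, if_pos hmid]
      have hsl1 : PySem.List.slice u none (some (mid : Int)) = u.take mid :=
        PySem.List.slice_to_natCast _ _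
      have h2i : (2 * (mid : Int)) = ((mid : Nat) : Int) + ((mid : Nat) : Int) := by ring
      have hsl2 : PySem.List.slice u (some (mid : Int)) (some (2 * (mid : Int)))
          = (u.drop mid).take mid := by rw [h2i, PySem.List.slice_natCast_add]
      have hsl3 : PySem.List.slice u (some (mid : Int)) none = u.drop mid :=
        PySem.List.slice_from_natCast _ _
      rw [hsl1, hsl2, hsl3]
      simp only [pvChk]
      by_cases hc : ((u.take mid).reverse == (u.drop mid).take mid) = true
      · rw [if_pos hc, if_pos hc]
        simp only [List.length_drop]
        apply ih
        have := pvMeas_fold u.length mid hmid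
        simp only [List.length_drop]
        omega
      · rw [if_neg hc, if_neg hc]
        exact ih u (mid - 1) (by omega)
    · rw [if_neg hmid, if_neg hmid]

theorem pvGA_eq_step (u : List Char) (mid : Nat) :
    pvGA u mid = (if pvFindDown (pvChk u) mid = 0 then u
                  else pvGA (u.drop (pvFindDown (pvChk u) mid))
                    ((u.length - pvFindDown (pvChk u) mid) / 2)) := by
  
  induction mid with
  | zero => simp [pvGA, pvFindDown]
  | succ k ih =>
    rw [pvGA, if_pos (Nat.succ_pos k)]
    by_cases hq : pvChk u (k + 1) = true
    · have hf : pvFindDown (pvChk u) (k + 1) = k + 1 := by simp [pvFindDown, hq]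
      rw [hf, if_pos hq, if_neg (by omega)]
    · have hf : pvFindDown (pvChk u) (k + 1) = pvFindDown (pvChk u) k := by
        simp only [pvFindDown]
        rw [if_neg hq]
      rw [hf, if_neg hq, Nat.add_sub_cancel]
      exact ih

theorem pvBloop_eq (fuel : Nat) : ∀ (u : List Char), u.length < fuel →
    pvBloop fuel u = (pvGA u (u.length / 2)).reverse := by
  
  induction fuel with
  | zero => intro u h; omega
  | succ fuel ih =>
    intro u h
    simp only [pvBloop]
    have hQ : ∀ kk, 1 ≤ kk → kk ≤ u.length / 2 →
        ((pvZfunc (u ++ '\x00' :: u.reverse)).getD (2 * u.length + 1 - 2 * kk) 0 == 2 * kk)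
          = pvChk u kk := by
      intro kk hk1 hk2
      rw [Bool.eq_iff_iff, beq_iff_eq, pvChk, beq_iff_eq]
      exact (pvZcond_iff u kk hk1 hk2).trans (pvChkA_iff u kk (by omega)).symm
    have hm : ((List.range' 1 (u.length / 2)).filter
        (fun kk => (pvZfunc (u ++ '\x00' :: u.reverse)).getD (2 * u.length + 1 - 2 * kk) 0
          == 2 * kk)).foldl max 0 = pvFindDown (pvChk u) (u.length / 2) := by
      rw [pvMaxFilter_eq]
      exact pvFindDown_congr _ _ _ hQ
    rw [hm]
    by_cases hf0 : pvFindDown (pvChk u) (u.length / 2) = 0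
    · rw [if_pos hf0, pvGA_eq_step, if_pos hf0]
    · rw [if_neg hf0, pvGA_eq_step, if_neg hf0]
      rcases pvFindDown_cases (pvChk u) (u.length / 2) with h0 | ⟨ha, hb, hc⟩
      · exact absurd h0 hf0
      · rw [ih (u.drop (pvFindDown (pvChk u) (u.length / 2))) (by simp; omega)]
        simp only [List.length_drop]

-- ===== VERDICT (by name: the statement is the Claim_ definition above) =====
theorem checkfold_spec : Claim_equal_checkfold := by
  intro sequence _
  unfold Spec_checkfold checkfold checkfold_alt
  have hb : sequence.toList.length * sequence.toList.length + sequence.toList.length / 2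
      < sequence.toList.length * sequence.toList.length + sequence.toList.length + 1 := by
    have := Nat.div_le_self sequence.toList.length 2
    omega
  rw [pvLoopA_eq_gA _ _ _ hb, ← pvBloop_eq (sequence.toList.length + 1) _ (by omega)]
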